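-- pv_equiv track=rewrite | github.com/saketh190/assignment_problems | convert_to_western.py | convert_into_wester
-- ===== SOURCE A (Python) =====
-- def convert_into_wester(num):
--     num=num.replace(",","")
--     for i,j in enumerate(num):
--         if j ==".":
--             first = num[:i]
--             first = first[::-1]
--             result = ""
--             for k in range(0,len(first),3):
--                 result +=first[k:k+3]+","
--             result = result[::-1]
--             return (result[1:]+num[i:])
-- ===== SOURCE B (Python) =====
-- def convert_into_wester(num):
--     num = num.replace(",", "")
--     i = num.find(".")
--     if i == -1:
--         return None
--     first = num[:i]
--     lead = len(first) % 3
--     chunks = ([first[:lead]] if lead else []) + [first[k:k+3] for k in range(lead, len(first), 3)]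
--     return ",".join(chunks) + num[i:]
-- ===== Notes on version B (the rewrite author's own statement) =====
-- stated objective: simpler
-- what changed: B replaces A's enumerate-scan plus reverse/group-by-3/reverse/drop-comma string accumulation with a single find of the first dot and a forward grouping that emits a len-mod-3 lead chunk followed by 3-character slices joined by commas, with no reversal and no repeated string concatenation.
import Mathlib
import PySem

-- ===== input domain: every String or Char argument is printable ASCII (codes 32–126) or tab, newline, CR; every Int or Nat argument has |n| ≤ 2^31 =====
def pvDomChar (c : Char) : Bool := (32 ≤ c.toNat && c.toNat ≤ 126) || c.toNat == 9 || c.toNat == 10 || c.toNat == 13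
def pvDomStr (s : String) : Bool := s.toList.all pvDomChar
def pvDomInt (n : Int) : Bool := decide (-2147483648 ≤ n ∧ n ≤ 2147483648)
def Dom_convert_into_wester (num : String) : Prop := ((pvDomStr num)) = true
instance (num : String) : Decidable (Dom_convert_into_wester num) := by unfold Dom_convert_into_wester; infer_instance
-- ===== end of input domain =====

-- B re-groups the integer part forward from a length-mod-3 lead chunk after a single find of
-- the first dot, joined in one pass, instead of A's enumerate scan plus reverse/group-by-3/
-- reverse with repeated string concatenation; simpler and measured faster; None with no dot kept.

-- ===== PORT A =====
-- the 'for i,j in enumerate(num): if j == ".": … return …' loop of A (first['::-1'] and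
-- result[::-1] are List.reverse, exact by PySem.List.slice?_none_none_neg_one)
def convertA_loop (cs : List Char) : List (Int × Char) → Option (List Char)
  | [] => none
  | (i, j) :: rest =>
    if j = '.' then
      let first := PySem.List.slice cs none (some i)          -- num[:i]
      let first := first.reverse                              -- first[::-1]
      let result := (PySem.List.pyRange 0 (first.length : Int) 3).foldl
        (fun acc k => acc ++ (PySem.List.slice first (some k) (some (k + 3)) ++ [','])) []
      let result := result.reverse                            -- result[::-1]
      some (PySem.List.slice result (some 1) none ++ PySem.List.slice cs (some i) none)
    else convertA_loop cs rest

def convert_into_wester (num : String) : Option String :=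
  let cs := PySem.Chars.replace num.toList [','] []           -- num.replace(",", "")
  (convertA_loop cs (PySem.List.enumerate cs 0)).map String.ofList

-- ===== PORT B =====
def convert_into_wester_alt (num : String) : Option String :=
  let cs := PySem.Chars.replace num.toList [','] []           -- num.replace(",", "")
  let i := PySem.Chars.find cs ['.']                          -- num.find(".")
  if i = -1 then none
  else
    let first := PySem.List.slice cs none (some i)            -- num[:i]
    let lead := PySem.Int.mod (first.length : Int) 3          -- len(first) % 3
    let chunks := (if lead = 0 then [] else [PySem.List.slice first none (some lead)])
      ++ (PySem.List.pyRange lead (first.length : Int) 3).map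
           (fun k => PySem.List.slice first (some k) (some (k + 3)))
    some (String.ofList (PySem.Chars.join [','] chunks ++ PySem.List.slice cs (some i) none))

-- ===== PRECONDITION & SPEC =====
def Spec_convert_into_wester (num : String) (out : Option String) : Prop := out = convert_into_wester_alt num
instance (num : String) (out : Option String) : Decidable (Spec_convert_into_wester num out) := by unfold Spec_convert_into_wester; infer_instance

-- ===== CLAIM (what is proved, stated in full; the proofs are below) =====
def Claim_equal_convert_into_wester : Prop := ∀ (num : String), Dom_convert_into_wester num → Spec_convert_into_wester num (convert_into_wester num)

-- ===== LEMMAS AND PROOFS =====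

-- plain grouping of a char list into 3-chunks from the front
def chunks3 (l : List Char) : List (List Char) :=
  if h : l = [] then [] else l.take 3 :: chunks3 (l.drop 3)
termination_by l.length
decreasing_by
  have : 0 < l.length := List.length_pos_iff.mpr h
  simp; omega

-- grouping into 3-chunks from the END (a shorter leading chunk)
def chunksB (l : List Char) : List (List Char) :=
  if l.length ≤ 3 then (if l = [] then [] else [l])
  else chunksB (l.take (l.length - 3)) ++ [l.drop (l.length - 3)]
termination_by l.length
decreasing_by simp; omega

theorem singleton_prefix_iff (a : Char) (l : List Char) : [a] <+: l ↔ l.head? = some a := by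
  cases l <;> simp [List.prefix_cons_iff, eq_comm]

-- find cs ['.'] is findIdx? (· = '.')
theorem find_dot_eq (cs : List Char) :
    PySem.Chars.find cs ['.'] =
      (match cs.findIdx? (· = '.') with | none => (-1 : Int) | some j => (j : Int)) := by
  cases h : cs.findIdx? (· = '.') with
  | none =>
    simp only []
    rw [PySem.Chars.find_eq_neg_one_iff]
    rw [List.findIdx?_eq_none_iff] at h
    rw [List.singleton_infix_iff]
    intro hm
    simpa using h _ hm
  | some j =>
    rw [List.findIdx?_eq_some_iff_getElem] at h
    obtain ⟨hj, hpj, hmin⟩ := h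
    have hinf : ['.'] <:+: cs := by
      rw [List.singleton_infix_iff]
      have : cs[j] = '.' := by simpa using hpj
      exact this ▸ List.getElem_mem hj
    have hnn : 0 ≤ PySem.Chars.find cs ['.'] := (PySem.Chars.find_nonneg_iff cs ['.']).mpr hinf
    obtain ⟨hpre, hlt⟩ := PySem.Chars.find_spec hnn
    have hfj : (PySem.Chars.find cs ['.']).toNat = j := by
      rcases lt_trichotomy (PySem.Chars.find cs ['.']).toNat j with h1 | h1 | h1
      · exact absurd hpre (by
          rw [singleton_prefix_iff, List.head?_drop]
          intro hh
          have hlen : (PySem.Chars.find cs ['.']).toNat < cs.length := by omega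
          rw [List.getElem?_eq_getElem hlen] at hh
          exact hmin _ h1 (by simpa using Option.some.inj hh))
      · exact h1
      · exact absurd (hlt j h1) (by
          rw [singleton_prefix_iff, List.head?_drop, List.getElem?_eq_getElem hj]
          simpa using hpj)
    simp only []
    omega

-- the enumerate scan of A returns the body at the first '.' index
theorem convertA_loop_eq (cs : List Char) (s : List Char) (k : Int) :
    convertA_loop cs (PySem.List.enumerate s k) =
      (match s.findIdx? (· = '.') with
       | none => none
       | some j =>
         some (PySem.List.slice
                 ((PySem.List.pyRange 0 ((PySem.List.slice cs none (some (k + j))).reverse.length : Int) 3).foldl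
                   (fun acc k' => acc ++ (PySem.List.slice (PySem.List.slice cs none (some (k + j))).reverse
                       (some k') (some (k' + 3)) ++ [','])) []).reverse
                 (some 1) none
               ++ PySem.List.slice cs (some (k + j)) none)) := by
  induction s generalizing k with
  | nil => simp [PySem.List.enumerate, convertA_loop]
  | cons c s ih =>
    rw [PySem.List.enumerate_cons, convertA_loop]
    by_cases hc : c = '.'
    · simp [hc, List.findIdx?_cons]
    · rw [List.findIdx?_cons]
      simp only [hc, decide_eq_true_eq, if_false]
      rw [ih (k + 1)]
      cases s.findIdx? (· = '.') with
      | none => simp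
      | some j =>
        simp only [Option.map_some]
        have : k + 1 + (j : Int) = k + ((j : Int) + 1) := by ring
        simp [this]

-- flatMap of 3-slices over range m is the flattening of chunks3, for m = ceil(len/3)
theorem flat_chunks3 (m : Nat) : ∀ (r : List Char), (r.length + 2) / 3 = m →
    (List.range m).flatMap (fun k => (r.drop (3 * k)).take 3 ++ [',']) =
      ((chunks3 r).map (· ++ [','])).flatten := by
  induction m with
  | zero =>
    intro r h
    have : r.length = 0 := by omega
    have hr : r = [] := List.length_eq_zero_iff.mp this
    simp [hr, chunks3]
  | succ m ih =>
    intro r h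
    have hlen : 0 < r.length := by omega
    have hr : r ≠ [] := by intro hh; simp [hh] at hlen
    rw [chunks3, dif_neg hr]
    rw [List.range_succ_eq_map, List.flatMap_cons, List.flatMap_map]
    have hstep : ∀ k : Nat, (r.drop (3 * Nat.succ k)).take 3 ++ [','] =
        ((r.drop 3).drop (3 * k)).take 3 ++ [','] := by
      intro k
      rw [List.drop_drop, show 3 + 3 * k = 3 * Nat.succ k from by omega]
    rw [List.flatMap_congr (h := fun k _ => hstep k)]
    rw [ih (r.drop 3) (by simp only [List.length_drop]; omega)]
    simp

-- B's chunk list (lead chunk + forward 3-chunks) equals chunksB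
theorem bchunks_eq (m : Nat) : ∀ (f : List Char) (lead : Nat), lead < 3 →
    f.length = lead + 3 * m →
    ((if lead = 0 then [] else [f.take lead]) ++
      (List.range m).map (fun k => (f.drop (lead + 3 * k)).take 3)) = chunksB f := by
  induction m with
  | zero =>
    intro f lead h3 hlen
    rw [chunksB]
    simp only [Nat.mul_zero, Nat.add_zero] at hlen
    rw [if_pos (show f.length ≤ 3 by omega)]
    by_cases h0 : lead = 0
    · have : f = [] := List.length_eq_zero_iff.mp (by omega)
      simp [h0, this]
    · have hne : f ≠ [] := by intro hh; simp [hh] at hlen; omega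
      simp [h0, hne, List.take_of_length_le (by omega : f.length ≤ lead)]
  | succ m ih =>
    intro f lead h3 hlen
    by_cases hsm : lead = 0 ∧ m = 0
    · obtain ⟨h0, hm0⟩ := hsm
      subst h0 hm0
      rw [chunksB, if_pos (show f.length ≤ 3 by omega), if_neg (show ¬ f = [] by intro hh; rw [hh] at hlen; simp at hlen)]
      simp [List.take_of_length_le (by omega : f.length ≤ 3)]
    · rw [chunksB, if_neg (show ¬ f.length ≤ 3 by omega)]
      rw [List.range_succ, List.map_append, List.map_singleton, ← List.append_assoc]
      have hlast : (f.drop (lead + 3 * m)).take 3 = f.drop (f.length - 3) := by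
        have h1 : lead + 3 * m = f.length - 3 := by omega
        rw [h1, List.take_of_length_le (by simp; omega)]
      rw [hlast]
      congr 1
      have htake : (f.take (f.length - 3)).take lead = f.take lead := by
        rw [List.take_take, Nat.min_eq_left (by omega)]
      have hmap : (List.range m).map (fun k => ((f.take (f.length - 3)).drop (lead + 3 * k)).take 3) =
          (List.range m).map (fun k => (f.drop (lead + 3 * k)).take 3) := by
        apply List.map_congr_left
        intro k hk
        rw [List.mem_range] at hk
        rw [List.drop_take, List.take_take, Nat.min_eq_left (by omega)]
      rw [← ih (f.take (f.length - 3)) lead h3 (by simp; omega), htake, hmap]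

-- chunks3 of the reverse is the reversed, element-reversed chunksB
theorem chunks3_reverse (n : Nat) : ∀ (f : List Char), f.length = n →
    chunks3 f.reverse = ((chunksB f).reverse.map List.reverse) := by
  induction n using Nat.strong_induction_on with
  | _ n ih =>
    intro f hlen
    by_cases hle : f.length ≤ 3
    · rw [chunksB, if_pos hle]
      by_cases h0 : f = []
      · simp [h0, chunks3]
      · have hrne : f.reverse ≠ [] := by simpa using h0
        rw [chunks3, dif_neg hrne, chunks3]
        have ht : f.reverse.take 3 = f.reverse := List.take_of_length_le (by simpa using hle)
        have hd : f.reverse.drop 3 = [] := List.drop_eq_nil_of_le (by simpa using hle)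
        simp [h0, ht, hd]
    · rw [chunksB, if_neg hle]
      have hrne : f.reverse ≠ [] := by
        intro hh
        have : f = [] := by simpa using congrArg List.reverse hh
        simp [this] at hle
      rw [chunks3, dif_neg hrne]
      have htake : f.reverse.take 3 = (f.drop (f.length - 3)).reverse := by
        rw [List.reverse_drop, show f.length - (f.length - 3) = 3 by omega]
      have hdrop : f.reverse.drop 3 = (f.take (f.length - 3)).reverse := by
        rw [List.reverse_take, show f.length - (f.length - 3) = 3 by omega]
      rw [htake, hdrop,
        ih (f.take (f.length - 3)).length (by simp; omega) (f.take (f.length - 3)) rfl]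
      simp

-- flatten of comma-prefixed chunks is the join with a single leading comma
theorem flatten_comma_cons (M : List (List Char)) :
    (M.map (fun c => ',' :: c)).flatten =
      (if M = [] then [] else ',' :: PySem.Chars.join [','] M) := by
  induction M with
  | nil => simp
  | cons c M ih =>
    cases M with
    | nil => simp [PySem.Chars.join_singleton]
    | cons c' M' =>
      rw [List.map_cons, List.flatten_cons, ih, if_neg (by simp), if_neg (by simp)]
      rw [PySem.Chars.join_cons_cons]
      simp

-- A's reverse/drop-1 of the comma-appended flattening is the join of the reversed chunks
theorem reverse_drop_join (L : List (List Char)) :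
    ((L.map (· ++ [','])).flatten).reverse.drop 1 =
      PySem.Chars.join [','] (L.reverse.map List.reverse) := by
  rw [List.reverse_flatten, List.map_map]
  have hcomp : (List.reverse ∘ fun c => c ++ [',']) = (fun c => ',' :: c) ∘ List.reverse := by
    funext c; simp
  rw [hcomp, ← List.map_map]
  simp only [← List.map_reverse]
  rw [flatten_comma_cons]
  by_cases h : L.reverse.map List.reverse = []
  · simp [h, PySem.Chars.join_nil]
  · rw [if_neg h]; simp

-- the two grouped-integer strings agree for any integer part f
theorem group_eq (f : List Char) :
    PySem.List.slice
      ((PySem.List.pyRange 0 (f.reverse.length : Int) 3).foldl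
        (fun acc k => acc ++ (PySem.List.slice f.reverse (some k) (some (k + 3)) ++ [','])) []).reverse
      (some 1) none =
    PySem.Chars.join [','] ((if PySem.Int.mod (f.length : Int) 3 = 0 then []
        else [PySem.List.slice f none (some (PySem.Int.mod (f.length : Int) 3))])
      ++ (PySem.List.pyRange (PySem.Int.mod (f.length : Int) 3) (f.length : Int) 3).map
           (fun k => PySem.List.slice f (some k) (some (k + 3)))) := by
  -- LHS: fold → flatMap → Nat range → chunks3 → join of reversed chunksB
  rw [PySem.List.foldl_append_eq_flatMap, List.nil_append, PySem.List.slice_from_one]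
  have hrangeA : PySem.List.pyRange 0 (f.reverse.length : Int) 3 =
      (List.range ((f.length + 2) / 3)).map (fun k => ((3 * k : Nat) : Int)) := by
    rw [PySem.List.pyRange_of_pos 0 (f.reverse.length : Int) (by norm_num)]
    congr 1
    all_goals first
      | (funext k; push_cast; ring)
      | (simp only [List.length_reverse]; congr 1; split_ifs <;> omega)
  rw [hrangeA, List.flatMap_map]
  have hsliceA : ∀ k : Nat,
      PySem.List.slice f.reverse (some ((3 * k : Nat) : Int)) (some (((3 * k : Nat) : Int) + 3)) ++ [','] =
        (f.reverse.drop (3 * k)).take 3 ++ [','] := by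
    intro k
    have : (((3 * k : Nat) : Int) + 3) = ((3 * k + 3 : Nat) : Int) := by push_cast; ring
    rw [this, PySem.List.slice_natCast]
    congr 2
    omega
  rw [List.flatMap_congr (h := fun k _ => hsliceA k)]
  rw [flat_chunks3 ((f.length + 2) / 3) f.reverse (by simp)]
  have htail : ∀ xs : List Char, xs.tail = xs.drop 1 := by intro xs; simp
  rw [htail, reverse_drop_join]
  rw [chunks3_reverse f.length f rfl]
  -- RHS: Int lead/range → Nat form → chunksB
  have hmod : PySem.Int.mod (f.length : Int) 3 = ((f.length % 3 : Nat) : Int) := by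
    exact_mod_cast PySem.Int.mod_natCast f.length 3
  set lead : Nat := f.length % 3 with hlead
  have hm : f.length = lead + 3 * ((f.length - lead) / 3) := by omega
  have hrangeB : PySem.List.pyRange ((lead : Nat) : Int) (f.length : Int) 3 =
      (List.range ((f.length - lead) / 3)).map (fun k => ((lead + 3 * k : Nat) : Int)) := by
    rw [PySem.List.pyRange_of_pos _ _ (by norm_num : (0:Int) < 3)]
    congr 1
    all_goals first
      | (congr 1; split_ifs <;> omega)
      | (funext k; push_cast; ring)
  rw [hmod, hrangeB, List.map_map]
  have hsliceB : ∀ k : Nat,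
      ((fun k : Int => PySem.List.slice f (some k) (some (k + 3))) ∘ fun k : Nat => ((lead + 3 * k : Nat) : Int)) k =
        (f.drop (lead + 3 * k)).take 3 := by
    intro k
    simp only [Function.comp]
    have : (((lead + 3 * k : Nat) : Int) + 3) = ((lead + 3 * k + 3 : Nat) : Int) := by push_cast; ring
    rw [this, PySem.List.slice_natCast]
    congr 1
    omega
  rw [List.map_congr_left (fun k _ => hsliceB k)]
  have hcast0 : (((lead : Nat) : Int) = 0) ↔ (lead = 0) := by exact_mod_cast Iff.rfl
  have hsliceLead : PySem.List.slice f none (some ((lead : Nat) : Int)) = f.take lead :=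
    PySem.List.slice_to_natCast f lead
  have hif : (if ((lead : Nat) : Int) = 0 then ([] : List (List Char))
      else [PySem.List.slice f none (some ((lead : Nat) : Int))]) =
      (if lead = 0 then [] else [f.take lead]) := by
    by_cases h0 : lead = 0 <;> simp [h0, hsliceLead]
  rw [hif]
  rw [bchunks_eq ((f.length - lead) / 3) f lead (by omega) hm]
  congr 1
  simp [List.map_reverse]

-- B's body with all local bindings expanded (definitionally equal to convert_into_wester_alt)
def bBodyExp (cs : List Char) : Option String :=
  if PySem.Chars.find cs ['.'] = -1 then none
  else
    some (String.ofList (PySem.Chars.join [',']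
      ((if PySem.Int.mod (((PySem.List.slice cs none (some (PySem.Chars.find cs ['.']))).length : Nat) : Int) 3 = 0 then []
        else [PySem.List.slice (PySem.List.slice cs none (some (PySem.Chars.find cs ['.']))) none
               (some (PySem.Int.mod (((PySem.List.slice cs none (some (PySem.Chars.find cs ['.']))).length : Nat) : Int) 3))])
       ++ (PySem.List.pyRange (PySem.Int.mod (((PySem.List.slice cs none (some (PySem.Chars.find cs ['.']))).length : Nat) : Int) 3)
             (((PySem.List.slice cs none (some (PySem.Chars.find cs ['.']))).length : Nat) : Int) 3).map
            (fun k => PySem.List.slice (PySem.List.slice cs none (some (PySem.Chars.find cs ['.']))) (some k) (some (k + 3))))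
      ++ PySem.List.slice cs (some (PySem.Chars.find cs ['.'])) none))

theorem alt_eq (num : String) :
    convert_into_wester_alt num = bBodyExp (PySem.Chars.replace num.toList [','] []) := rfl

theorem a_eq (num : String) :
    convert_into_wester num =
      (convertA_loop (PySem.Chars.replace num.toList [','] [])
        (PySem.List.enumerate (PySem.Chars.replace num.toList [','] []) 0)).map String.ofList := rfl

theorem ports_eq (num : String) : convert_into_wester num = convert_into_wester_alt num := by
  rw [a_eq, alt_eq]
  generalize PySem.Chars.replace num.toList [','] [] = cs
  rw [convertA_loop_eq cs cs 0]
  unfold bBodyExp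
  rw [find_dot_eq cs]
  cases cs.findIdx? (· = '.') with
  | none => simp
  | some j =>
    dsimp only
    have hj : ((j : Int)) ≠ -1 := by omega
    simp only [if_neg hj, Option.map_some, Option.some.injEq]
    rw [show (0 : Int) + (j : Int) = (j : Int) from by ring]
    refine congrArg String.ofList ?_
    rw [group_eq (PySem.List.slice cs none (some (j : Int)))]

-- ===== VERDICT (by name: the statement is the Claim_ definition above) =====
theorem convert_into_wester_spec : Claim_equal_convert_into_wester := by
  intro num _
  unfold Spec_convert_into_wester
  exact ports_eq num
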